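-- pv_equiv track=rewrite | github.com/tooniesnguyen/Tensorbot_NLP_System | utils/data.py | dialogues_to_pairs
-- ===== SOURCE A (Python) =====
-- def dialogues_to_pairs(dialogues, max_tokens = None): #
--     """
--     Convert dialogues to training pairs of phrases
--
--     Convet thành các cặp câu để  train
--
--     :param dialogues:
--     :param max_tokens: limit of tokens in both question and reply
--     :return: list of (phrase, phrase) pairs
--     """
--     result = []
--     for dial in dialogues: # dial: [["he's", 'not', 'in', 'this', 'building', '.'], ['all', 'right', ',', 'where', 'is', 'he', '?']]
--         prev_phrase = None
--         for phrase in dial: # phrase: ["he's", 'not', 'in', 'this', 'building', '.']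
--             if prev_phrase is not None:
--                 if max_tokens is None or (len(prev_phrase) <= max_tokens and len(phrase) <= max_tokens):
--                     result.append((prev_phrase, phrase))
--             prev_phrase = phrase
--
--     return result
-- ===== SOURCE B (Python) =====
-- def dialogues_to_pairs(dialogues, max_tokens=None):
--     return [
--         (a, b)
--         for dial in dialogues
--         for a, b in zip(dial, dial[1:])
--         if max_tokens is None or (len(a) <= max_tokens and len(b) <= max_tokens)
--     ]
-- ===== Notes on version B (the rewrite author's own statement) =====
-- stated objective: idiomatic
-- what changed: Replaces the stateful prev_phrase accumulator loop with adjacent-pair generation via zip(dial, dial[1:]) and a filtered nested comprehension.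
import Mathlib
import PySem

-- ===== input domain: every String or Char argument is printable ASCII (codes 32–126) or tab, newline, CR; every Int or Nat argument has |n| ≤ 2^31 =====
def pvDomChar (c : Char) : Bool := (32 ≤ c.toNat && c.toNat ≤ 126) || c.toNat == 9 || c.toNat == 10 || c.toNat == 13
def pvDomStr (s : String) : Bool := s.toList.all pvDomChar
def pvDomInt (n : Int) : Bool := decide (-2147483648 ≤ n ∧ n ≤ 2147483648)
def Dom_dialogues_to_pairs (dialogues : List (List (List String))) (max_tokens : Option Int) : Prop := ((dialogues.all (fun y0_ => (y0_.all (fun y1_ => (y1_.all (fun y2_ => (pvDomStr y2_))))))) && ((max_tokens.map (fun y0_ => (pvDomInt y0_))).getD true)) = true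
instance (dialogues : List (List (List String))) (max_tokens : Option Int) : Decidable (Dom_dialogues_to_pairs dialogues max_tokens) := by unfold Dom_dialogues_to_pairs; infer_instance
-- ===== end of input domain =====

-- B replaces A's stateful prev_phrase loop by adjacent-pair generation (zip with the tail) and filtering; objective: idiomatic.


-- ===== PORT A =====
-- the filter condition 'max_tokens is None or (len(prev) <= max_tokens and len(phrase) <= max_tokens)'
def pvKeep (max_tokens : Option Int) (a b : List String) : Bool :=
  match max_tokens with
  | none => true
  | some m => decide ((a.length : Int) ≤ m) && decide ((b.length : Int) ≤ m)

-- inner loop over a dialogue: state = (result, prev_phrase)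
def pvInnerA (max_tokens : Option Int) (st : List (List String × List String) × Option (List String))
    (phrase : List String) : List (List String × List String) × Option (List String) :=
  match st.2 with
  | none => (st.1, some phrase)
  | some prev =>
      (if pvKeep max_tokens prev phrase then st.1 ++ [(prev, phrase)] else st.1, some phrase)

def dialogues_to_pairs (dialogues : List (List (List String))) (max_tokens : Option Int) : List (List String × List String) :=
  dialogues.foldl (fun result dial => (dial.foldl (pvInnerA max_tokens) (result, none)).1) []

-- ===== PORT B =====
def dialogues_to_pairs_alt (dialogues : List (List (List String))) (max_tokens : Option Int) : List (List String × List String) :=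
  dialogues.flatMap (fun dial =>
    (dial.zip dial.tail).filter (fun p => pvKeep max_tokens p.1 p.2))

-- ===== PRECONDITION & SPEC =====
def Spec_dialogues_to_pairs (dialogues : List (List (List String))) (max_tokens : Option Int) (out : List (List String × List String)) : Prop := out = dialogues_to_pairs_alt dialogues max_tokens
instance (dialogues : List (List (List String))) (max_tokens : Option Int) (out : List (List String × List String)) : Decidable (Spec_dialogues_to_pairs dialogues max_tokens out) := by unfold Spec_dialogues_to_pairs; infer_instance

-- ===== CLAIM (what is proved, stated in full; the proofs are below) =====
def Claim_equal_dialogues_to_pairs : Prop := ∀ (dialogues : List (List (List String))) (max_tokens : Option Int), Dom_dialogues_to_pairs dialogues max_tokens → Spec_dialogues_to_pairs dialogues max_tokens (dialogues_to_pairs dialogues max_tokens)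

-- ===== LEMMAS AND PROOFS =====

-- the inner loop, started after 'prev' pairs everything in (prev :: dial)
theorem pvInner_eq (max_tokens : Option Int) (dial : List (List String)) :
    ∀ (acc : List (List String × List String)) (prev : Option (List String)),
      (dial.foldl (pvInnerA max_tokens) (acc, prev)).1 =
        acc ++ ((match prev with
                 | none => dial.zip dial.tail
                 | some p => (p :: dial).zip dial).filter
                  (fun q => pvKeep max_tokens q.1 q.2)) := by
  induction dial with
  | nil => intro acc prev; cases prev <;> simp
  | cons phrase rest ih =>
      intro acc prev
      cases prev with
      | none =>
          simp only [List.foldl_cons, pvInnerA, List.tail_cons]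
          exact ih acc (some phrase)
      | some p =>
          simp only [List.foldl_cons, pvInnerA]
          rw [ih _ (some phrase), List.zip_cons_cons, List.filter_cons]
          by_cases h : pvKeep max_tokens p phrase = true <;> simp [h]

theorem pvOuter_eq (max_tokens : Option Int) (dialogues : List (List (List String))) :
    ∀ acc : List (List String × List String),
      dialogues.foldl (fun result dial => (dial.foldl (pvInnerA max_tokens) (result, none)).1) acc =
        acc ++ dialogues_to_pairs_alt dialogues max_tokens := by
  induction dialogues with
  | nil => intro acc; simp [dialogues_to_pairs_alt]
  | cons dial rest ih =>
      intro acc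
      simp only [List.foldl_cons]
      rw [pvInner_eq, ih, dialogues_to_pairs_alt]
      simp [dialogues_to_pairs_alt, List.flatMap_cons]

-- ===== VERDICT (by name: the statement is the Claim_ definition above) =====
theorem dialogues_to_pairs_spec : Claim_equal_dialogues_to_pairs := by
  intro dialogues max_tokens _
  show dialogues_to_pairs dialogues max_tokens = _
  rw [dialogues_to_pairs, pvOuter_eq]
  simp
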